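-- pv_equiv track=rewrite | github.com/kimgyuhee/Python | Chapter0_Algorithm/2306/230602/test02.py | solution
-- ===== SOURCE A (Python) =====
-- import itertools
--
-- def solution(n, left, right):
--     answer = [[n+1]*n for _ in range(n)]
--     for i in range(n) :
--         arr = [i for i in range(n-i)]
--         per = list(itertools.product(arr, repeat=2))
--         for p in per :
--             answer[p[0]][p[1]] -=1
--
--     result = []
--     for a in answer :
--         result+=a
--     return result[left:right+1]
-- ===== SOURCE B (Python) =====
-- def solution(n, left, right):
--     # cell (r, c) of the grid holds max(r, c) + 1; flattened index k maps to
--     # row k // n, col k % n, so compute only the requested window directly.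
--     if n <= 0:
--         return []
--     lo, hi, _ = slice(left, right + 1).indices(n * n)
--     return [max(k // n, k % n) + 1 for k in range(lo, hi)]
-- ===== Notes on version B (the rewrite author's own statement) =====
-- stated objective: faster
-- what changed: Replaces building the whole n x n grid with a triple loop of decrements by a closed form: each requested flattened index k directly gets max(k // n, k % n) + 1, computed only over the normalized slice window.
import Mathlib
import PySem

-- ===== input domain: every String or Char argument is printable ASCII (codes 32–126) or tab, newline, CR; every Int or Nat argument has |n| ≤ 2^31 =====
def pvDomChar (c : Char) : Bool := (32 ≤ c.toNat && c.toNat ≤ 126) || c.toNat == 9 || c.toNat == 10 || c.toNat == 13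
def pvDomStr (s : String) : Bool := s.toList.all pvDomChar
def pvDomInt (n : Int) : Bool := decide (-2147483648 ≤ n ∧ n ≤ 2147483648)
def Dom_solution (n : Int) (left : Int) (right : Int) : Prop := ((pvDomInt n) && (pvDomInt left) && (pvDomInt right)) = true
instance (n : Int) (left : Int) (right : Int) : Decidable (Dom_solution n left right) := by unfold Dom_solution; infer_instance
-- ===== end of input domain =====

-- B replaces A's O(n^3) build-grid-then-decrement with the closed form max(k//n, k%n)+1
-- computed only over the normalized slice window (objective: faster).

-- ===== PORT A =====
def solution (n : Int) (left : Int) (right : Int) : List Int :=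
  let answer0 : List (List Int) :=
    (PySem.List.pyRange 0 n 1).map (fun _ => PySem.List.pyRepeat [n + 1] n)
  let answer :=
    (PySem.List.pyRange 0 n 1).foldl (fun answer i =>
      let arr := PySem.List.pyRange 0 (n - i) 1
      let per := arr.flatMap (fun a => arr.map (fun b => (a, b)))
      per.foldl (fun answer p =>
        PySem.List.pySetD answer p.1
          (PySem.List.pySetD (PySem.List.pyGetD answer p.1 []) p.2
            (PySem.List.pyGetD (PySem.List.pyGetD answer p.1 []) p.2 0 - 1))) answer) answer0
  let result := answer.foldl (fun result a => result ++ a) []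
  PySem.List.slice result (some left) (some (right + 1))

-- ===== PORT B =====
def solution_alt (n : Int) (left : Int) (right : Int) : List Int :=
  if n ≤ 0 then []
  else
    let size := (n * n).toNat
    let lo := PySem.List.clampIdx size left            -- slice(left, right+1).indices(size)
    let hi := PySem.List.clampIdx size (right + 1)
    (PySem.List.pyRange (lo : Int) (hi : Int) 1).map
      (fun k => max (PySem.Int.floordiv k n) (PySem.Int.mod k n) + 1)

-- ===== PRECONDITION & SPEC =====
def Spec_solution (n : Int) (left : Int) (right : Int) (out : List Int) : Prop := out = solution_alt n left right
instance (n : Int) (left : Int) (right : Int) (out : List Int) : Decidable (Spec_solution n left right out) := by unfold Spec_solution; infer_instance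

-- ===== CLAIM (what is proved, stated in full; the proofs are below) =====
def Claim_equal_solution : Prop := ∀ (n : Int) (left : Int) (right : Int), Dom_solution n left right → Spec_solution n left right (solution n left right)

-- ===== LEMMAS AND PROOFS =====

/-- `l.set b (l.getD b d - 1)` is `l.modify b (· - 1)` (both are no-ops out of range). -/
lemma set_getD_sub_one (l : List Int) (b : Nat) :
    l.set b (l.getD b 0 - 1) = l.modify b (fun x => x - 1) := by
  rcases lt_or_ge b l.length with h | h
  · apply List.ext_getElem
    · simp
    intro i h1 h2
    simp [List.getElem_set, List.getElem_modify, List.getD_eq_getElem?_getD,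
      List.getElem?_eq_getElem h]
    split <;> simp_all
  · simp [List.set_eq_of_length_le h, List.modify_eq_self h]

/-- `g.set a (f (g.getD a d))` is `g.modify a f`. -/
lemma set_getD_eq_modify {α : Type} (g : List α) (a : Nat) (d : α) (f : α → α) :
    g.set a (f (g.getD a d)) = g.modify a f := by
  rcases lt_or_ge a g.length with h | h
  · apply List.ext_getElem
    · simp
    intro i h1 h2
    simp [List.getElem_set, List.getElem_modify, List.getD_eq_getElem?_getD,
      List.getElem?_eq_getElem h]
    split <;> simp_all
  · simp [List.set_eq_of_length_le h, List.modify_eq_self h]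

/-- modifying with the identity is a no-op. -/
lemma modify_id {α : Type} (l : List α) (i : Nat) : l.modify i (fun x => x) = l := by
  apply List.ext_getElem
  · simp
  intro j h1 h2
  simp only [List.getElem_modify]
  split <;> rfl

/-- 'for a in range(m): modify position a by f' is a guarded mapIdx. -/
lemma foldl_range_modify {α : Type} (f : α → α) :
    ∀ (m : Nat) (G : List α),
      (List.range m).foldl (fun g a => g.modify a f) G
        = G.mapIdx (fun r x => if r < m then f x else x) := by
  intro m
  induction m with
  | zero => intro G; simp only [List.range_zero, List.foldl_nil]; apply List.ext_getElem <;> simp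
  | succ m ih =>
    intro G
    rw [List.range_succ, List.foldl_append, ih]
    simp only [List.foldl_cons, List.foldl_nil]
    apply List.ext_getElem
    · simp
    intro i h1 h2
    simp only [List.getElem_modify, List.getElem_mapIdx]
    rcases Nat.lt_trichotomy i m with h | h | h <;> simp_all <;>
      try (intro h'; exact absurd h' (by omega))
    split_ifs <;> first | rfl | omega

/-- counting `i < t` in `range k`. -/
lemma countP_range_lt (k t : Nat) :
    (List.range k).countP (fun i => decide (i < t)) = min t k := by
  induction k with
  | zero => simp
  | succ k ih =>
    rw [List.range_succ, List.countP_append, ih]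
    simp [List.countP_singleton]
    split <;> omega

/-- One round of A's decrements (over all pairs from `range m`), as a guarded mapIdx. -/
lemma inner_round (m : Nat) (G : List (List Int)) :
    ((List.range m).flatMap (fun (a : Nat) => (List.range m).map (fun (b : Nat) => ((a : Int), (b : Int))))).foldl
        (fun answer p =>
          PySem.List.pySetD answer p.1
            (PySem.List.pySetD (PySem.List.pyGetD answer p.1 []) p.2
              (PySem.List.pyGetD (PySem.List.pyGetD answer p.1 []) p.2 0 - 1))) G
      = G.mapIdx (fun r row =>
          if r < m then row.mapIdx (fun c x => if c < m then x - 1 else x) else row) := by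
  rw [List.foldl_flatMap]
  have step : ∀ (g : List (List Int)) (a b : Nat),
      PySem.List.pySetD g (a : Int)
        (PySem.List.pySetD (PySem.List.pyGetD g (a : Int) []) (b : Int)
          (PySem.List.pyGetD (PySem.List.pyGetD g (a : Int) []) (b : Int) 0 - 1))
      = g.modify a (fun row => row.modify b (fun x => x - 1)) := by
    intro g a b
    have h1 : ∀ (l : List Int),
        PySem.List.pySetD l (b : Int) (PySem.List.pyGetD l (b : Int) 0 - 1)
          = l.modify b (fun x => x - 1) := by
      intro l
      rw [PySem.List.pyGetD_natCast, PySem.List.pySetD_natCast]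
      exact set_getD_sub_one l b
    rw [PySem.List.pyGetD_natCast g a [], h1 (g.getD a []), PySem.List.pySetD_natCast]
    exact set_getD_eq_modify g a [] (fun row => row.modify b (fun x => x - 1))
  have comp : ∀ (a : Nat) (bs : List Nat) (g : List (List Int)),
      (bs.map (fun (b : Nat) => ((a : Int), (b : Int)))).foldl
          (fun answer p =>
            PySem.List.pySetD answer p.1
              (PySem.List.pySetD (PySem.List.pyGetD answer p.1 []) p.2
                (PySem.List.pyGetD (PySem.List.pyGetD answer p.1 []) p.2 0 - 1))) g
        = g.modify a (fun row => bs.foldl (fun row b => row.modify b (fun x => x - 1)) row) := by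
    intro a bs
    induction bs with
    | nil => intro g; simp [modify_id]
    | cons b bs ih =>
      intro g
      simp only [List.map_cons, List.foldl_cons]
      rw [step g a b, ih, List.modify_modify_eq]
      rfl
  have modfold : ∀ (a : Nat) (g : List (List Int)),
      ((List.range m).map (fun (b : Nat) => ((a : Int), (b : Int)))).foldl
          (fun answer p =>
            PySem.List.pySetD answer p.1
              (PySem.List.pySetD (PySem.List.pyGetD answer p.1 []) p.2
                (PySem.List.pyGetD (PySem.List.pyGetD answer p.1 []) p.2 0 - 1))) g
        = g.modify a (fun row => row.mapIdx (fun c x => if c < m then x - 1 else x)) := by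
    intro a g
    rw [comp]
    congr 1
    funext row
    exact foldl_range_modify (fun x => x - 1) m row
  have hcong : ∀ (g : List (List Int)) (a : Nat), a ∈ List.range m →
      ((List.range m).map (fun (b : Nat) => ((a : Int), (b : Int)))).foldl
          (fun answer p =>
            PySem.List.pySetD answer p.1
              (PySem.List.pySetD (PySem.List.pyGetD answer p.1 []) p.2
                (PySem.List.pyGetD (PySem.List.pyGetD answer p.1 []) p.2 0 - 1))) g
        = g.modify a (fun row => row.mapIdx (fun c x => if c < m then x - 1 else x)) :=
    fun g a _ => modfold a g
  rw [PySem.List.foldl_congr_mem _ _ _ _ hcong]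
  exact foldl_range_modify
    (fun row : List Int => row.mapIdx (fun c x => if c < m then x - 1 else x)) m G

/-- Folding guarded-mapIdx rounds subtracts, at each cell, the number of rounds covering it. -/
lemma rounds_fold {ι : Type} (h : ι → Nat) (idx : List ι) :
    ∀ (G : List (List Int)),
      idx.foldl (fun g i => g.mapIdx (fun r row =>
          if r < h i then row.mapIdx (fun c x => if c < h i then x - 1 else x) else row)) G
        = G.mapIdx (fun r row => row.mapIdx (fun c x =>
            x - (idx.countP (fun i => decide (r < h i) && decide (c < h i)) : Int))) := by
  induction idx with
  | nil =>
    intro G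
    apply List.ext_getElem
    · simp
    intro i h1 h2
    simp only [List.foldl_nil, List.getElem_mapIdx]
    apply List.ext_getElem
    · simp
    intro j h3 h4
    simp
  | cons i0 idx ih =>
    intro G
    rw [List.foldl_cons, ih]
    apply List.ext_getElem
    · simp
    intro i h1 h2
    simp only [List.getElem_mapIdx]
    apply List.ext_getElem
    · by_cases h' : i < h i0 <;> simp [h']
    intro j h3 h4
    by_cases hi : i < h i0 <;> by_cases hj : j < h i0 <;>
      simp [hi, hj, List.countP_cons] <;> omega

/-- Flattening a j×w grid given by f : row → col → value. -/
lemma flatMap_grid (w : Nat) (f : Nat → Nat → Int) :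
    ∀ (j : Nat),
      (List.range j).flatMap (fun r => (List.range w).map (fun c => f r c))
        = (List.range (j * w)).map (fun k => f (k / w) (k % w)) := by
  intro j
  induction j with
  | zero => simp
  | succ j ih =>
    rw [List.range_succ, List.flatMap_append, ih]
    have hw : (j + 1) * w = j * w + w := by ring
    rw [hw, List.range_add, List.map_append, List.map_map]
    simp only [List.flatMap_cons, List.flatMap_nil, List.append_nil]
    congr 1
    apply List.map_congr_left
    intro c hc
    rw [List.mem_range] at hc
    have h0 : 0 < w := lt_of_le_of_lt (Nat.zero_le c) hc
    have h1 : (j * w + c) / w = j := by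
      rw [Nat.add_comm, Nat.add_mul_div_right c j h0]
      simp [Nat.div_eq_of_lt hc]
    have h2 : (j * w + c) % w = c := by
      rw [Nat.add_comm, Nat.add_mul_mod_self_right]
      exact Nat.mod_eq_of_lt hc
    simp [Function.comp, h1, h2]

-- closed form for A's grid build + flatten, for n = ↑n'
lemma grid_closed (n' : Nat) :
    (((PySem.List.pyRange 0 (n' : Int) 1).foldl (fun answer i =>
        let arr := PySem.List.pyRange 0 ((n' : Int) - i) 1
        let per := arr.flatMap (fun a => arr.map (fun b => (a, b)))
        per.foldl (fun answer p =>
          PySem.List.pySetD answer p.1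
            (PySem.List.pySetD (PySem.List.pyGetD answer p.1 []) p.2
              (PySem.List.pyGetD (PySem.List.pyGetD answer p.1 []) p.2 0 - 1))) answer)
      ((PySem.List.pyRange 0 (n' : Int) 1).map (fun _ => PySem.List.pyRepeat [(n' : Int) + 1] (n' : Int))))).foldl
        (fun result a => result ++ a) []
    = (List.range (n' * n')).map
        (fun k => ((max (k / n') (k % n') : Nat) : Int) + 1) := by
  have hinit : ((List.range n').map (fun (k : Nat) => (k : Int))).map
        (fun _ => PySem.List.pyRepeat [(n' : Int) + 1] (n' : Int))
      = (List.range n').map (fun _ => List.replicate n' ((n' : Int) + 1)) := by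
    rw [List.map_map]
    simp only [PySem.List.pyRepeat_singleton, Int.toNat_natCast]
    rfl
  have round_eq : ∀ (i : Nat) (g : List (List Int)),
      (let arr := PySem.List.pyRange 0 ((n' : Int) - (i : Int)) 1
       let per := arr.flatMap (fun a => arr.map (fun b => (a, b)))
       per.foldl (fun answer p =>
         PySem.List.pySetD answer p.1
           (PySem.List.pySetD (PySem.List.pyGetD answer p.1 []) p.2
             (PySem.List.pyGetD (PySem.List.pyGetD answer p.1 []) p.2 0 - 1))) g)
      = g.mapIdx (fun r row =>
          if r < ((n' : Int) - (i : Int)).toNat then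
            row.mapIdx (fun c x => if c < ((n' : Int) - (i : Int)).toNat then x - 1 else x)
          else row) := by
    intro i g
    have harr : PySem.List.pyRange 0 ((n' : Int) - (i : Int)) 1
        = (List.range (((n' : Int) - (i : Int)).toNat)).map (fun (k : Nat) => (k : Int)) :=
      PySem.List.pyRange_zero _
    show (((PySem.List.pyRange 0 ((n' : Int) - (i : Int)) 1).flatMap
        (fun a => (PySem.List.pyRange 0 ((n' : Int) - (i : Int)) 1).map (fun b => (a, b)))).foldl _ g) = _
    rw [harr, List.flatMap_map]
    simp only [List.map_map]
    exact inner_round (((n' : Int) - (i : Int)).toNat) g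
  rw [PySem.List.pyRange_zero_nat, List.foldl_map, hinit]
  simp only [round_eq]
  rw [rounds_fold (fun i : Nat => ((n' : Int) - (i : Int)).toNat) (List.range n')]
  have hgrid : (((List.range n').map (fun _ => List.replicate n' ((n' : Int) + 1))).mapIdx
      (fun r row => row.mapIdx (fun c x =>
        x - ((List.range n').countP
              (fun (i : Nat) => decide (r < ((n' : Int) - (i : Int)).toNat) && decide (c < ((n' : Int) - (i : Int)).toNat)) : Int))))
      = (List.range n').map (fun r => (List.range n').map (fun c =>
          ((max r c : Nat) : Int) + 1)) := by
    apply List.ext_getElem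
    · simp
    intro r h1 h2
    simp only [List.getElem_mapIdx, List.getElem_map, List.getElem_range]
    have hr : r < n' := by simpa using h2
    apply List.ext_getElem
    · simp
    intro c h3 h4
    simp only [List.getElem_mapIdx, List.getElem_map, List.getElem_range, List.getElem_replicate]
    have hc : c < n' := by simpa using h4
    have hcount : (List.range n').countP
          (fun (i : Nat) => decide (r < ((n' : Int) - (i : Int)).toNat) && decide (c < ((n' : Int) - (i : Int)).toNat))
        = n' - max r c := by
      have heq : ∀ i ∈ List.range n',
          ((decide (r < ((n' : Int) - (i : Int)).toNat) && decide (c < ((n' : Int) - (i : Int)).toNat)) = true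
            ↔ decide (i < n' - max r c) = true) := by
        intro i _
        have h5 : (((n' : Int) - (i : Int)).toNat) = n' - i := by omega
        rw [h5]
        simp only [Bool.and_eq_true, decide_eq_true_eq]
        omega
      rw [List.countP_congr heq, countP_range_lt]
      omega
    rw [hcount]
    have hle : max r c ≤ n' := le_of_lt (by omega)
    have hcast : ((n' - max r c : Nat) : Int) = (n' : Int) - (max r c : Nat) := by omega
    rw [hcast]
    ring
  rw [hgrid]
  have hflat : ∀ (L : List (List Int)), List.foldl (fun result a => result ++ a) [] L = L.flatten := by
    intro L
    have := PySem.List.foldl_append_eq_flatMap (fun x : List Int => x) L []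
    simpa [List.flatMap] using this
  rw [hflat]
  have hjoin : ((List.range n').map (fun r => (List.range n').map (fun c =>
      ((max r c : Nat) : Int) + 1))).flatten
      = (List.range n').flatMap (fun r => (List.range n').map (fun c =>
          ((max r c : Nat) : Int) + 1)) := by
    rw [List.flatMap_def]
  rw [hjoin, flatMap_grid n' (fun r c => ((max r c : Nat) : Int) + 1) n']

theorem solution_spec' : ∀ (n left right : Int), solution n left right = solution_alt n left right := by
  intro n left right
  by_cases hn : n ≤ 0
  · -- n ≤ 0: both sides are []
    unfold solution solution_alt
    rw [PySem.List.pyRange_one_eq_nil hn]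
    simp [hn, PySem.List.slice]
  · replace hn : 0 < n := by omega
    obtain ⟨n', rfl⟩ : ∃ m : Nat, n = (m : Int) := ⟨n.toNat, (Int.toNat_of_nonneg hn.le).symm⟩
    unfold solution solution_alt
    dsimp only
    rw [if_neg (by omega : ¬ ((n' : Int) ≤ 0))]
    rw [grid_closed n']
    have hsize : (((n' : Int)) * ((n' : Int))).toNat = n' * n' := by
      omega
    rw [hsize]
    set L := (List.range (n' * n')).map
        (fun k => ((max (k / n') (k % n') : Nat) : Int) + 1) with hL
    have hlen : L.length = n' * n' := by simp [hL]
    set lo := PySem.List.clampIdx (n' * n') left with hlo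
    set hi := PySem.List.clampIdx (n' * n') (right + 1) with hhi
    have hlos : lo ≤ n' * n' := PySem.List.clampIdx_le _ _
    have hhis : hi ≤ n' * n' := PySem.List.clampIdx_le _ _
    have hslice : PySem.List.slice L (some left) (some (right + 1))
        = (L.drop lo).take (hi - lo) := by
      simp only [PySem.List.slice, hlen, hlo, hhi]
    rw [hslice, PySem.List.pyRange_one]
    have hlen2 : (((hi : Int)) - ((lo : Int))).toNat = hi - lo := by omega
    rw [hlen2]
    apply List.ext_getElem
    · simp [hL]
      omega
    intro i h1 h2
    have hi2 : i < hi - lo := by simpa using h2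
    simp only [List.getElem_take, List.getElem_drop, List.getElem_map, List.getElem_range, hL]
    have hmem : lo + i < n' * n' := by omega
    have hn'pos : 0 < n' := by
      by_contra h
      have : n' = 0 := by omega
      subst this
      omega
    have hdiv : PySem.Int.floordiv ((lo : Int) + (i : Int)) (n' : Int)
        = (((lo + i) / n' : Nat) : Int) := by
      have : ((lo : Int) + (i : Int)) = ((lo + i : Nat) : Int) := by push_cast; ring
      rw [this]
      exact_mod_cast PySem.Int.floordiv_natCast (lo + i) n'
    have hmod : PySem.Int.mod ((lo : Int) + (i : Int)) (n' : Int)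
        = (((lo + i) % n' : Nat) : Int) := by
      have : ((lo : Int) + (i : Int)) = ((lo + i : Nat) : Int) := by push_cast; ring
      rw [this]
      exact_mod_cast PySem.Int.mod_natCast (lo + i) n'
    rw [hdiv, hmod]
    have : max (((lo + i) / n' : Nat) : Int) (((lo + i) % n' : Nat) : Int)
        = ((max ((lo + i) / n') ((lo + i) % n') : Nat) : Int) := by
      exact_mod_cast (Nat.cast_max _ _).symm
    rw [this]

-- ===== VERDICT (by name: the statement is the Claim_ definition above) =====
theorem solution_spec : Claim_equal_solution := by
  intro n left right _
  unfold Spec_solution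
  exact solution_spec' n left right
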